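-- pv_equiv track=rewrite | github.com/rishi02102017/Metafusion-Task | compute_metrics_pretrained.py | extract_attributes
-- ===== SOURCE A (Python) =====
-- def extract_attributes(caption):
--     """Extract attributes from caption text."""
--     caption_lower = caption.lower()
--
--     attributes = {
--         'gender': None,
--         'age': None,
--         'hair_color': None,
--         'upper_color': None,
--         'lower_color': None,
--         'bag': None,
--     }
--
--     # Gender
--     if 'woman' in caption_lower or 'female' in caption_lower or 'lady' in caption_lower:
--         attributes['gender'] = 'female'
--     elif 'man' in caption_lower or 'male' in caption_lower or 'gentleman' in caption_lower:
--         attributes['gender'] = 'male'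
--
--     # Age
--     if 'young' in caption_lower:
--         attributes['age'] = 'young'
--     elif 'middle-aged' in caption_lower or 'middle aged' in caption_lower:
--         attributes['age'] = 'middle'
--     elif 'elderly' in caption_lower or 'old' in caption_lower:
--         attributes['age'] = 'old'
--
--     # Hair color
--     hair_colors = ['black', 'brown', 'blonde', 'gray', 'grey', 'white', 'red']
--     for color in hair_colors:
--         if f'{color} hair' in caption_lower or f'{color}-haired' in caption_lower:
--             attributes['hair_color'] = color
--             break
--
--     # Upper body color
--     upper_keywords = ['shirt', 'top', 'jacket', 'coat', 'sweater', 'blouse', 'dress', 't-shirt']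
--     colors = ['black', 'white', 'red', 'blue', 'green', 'yellow', 'orange', 'purple',
--               'pink', 'brown', 'gray', 'grey', 'navy', 'beige']
--
--     for color in colors:
--         for keyword in upper_keywords:
--             if f'{color} {keyword}' in caption_lower:
--                 attributes['upper_color'] = color
--                 break
--         if attributes['upper_color']:
--             break
--
--     # Lower body color
--     lower_keywords = ['pants', 'jeans', 'shorts', 'skirt', 'trousers']
--     for color in colors:
--         for keyword in lower_keywords:
--             if f'{color} {keyword}' in caption_lower:
--                 attributes['lower_color'] = color
--                 break
--         if attributes['lower_color']:
--             break
--
--     # Bag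
--     if 'backpack' in caption_lower:
--         attributes['bag'] = 'backpack'
--     elif 'handbag' in caption_lower or 'purse' in caption_lower:
--         attributes['bag'] = 'handbag'
--     elif 'bag' in caption_lower:
--         attributes['bag'] = 'bag'
--
--     return attributes
-- ===== SOURCE B (Python) =====
-- GENDER = [('female', ['woman', 'female', 'lady']),
--           ('male', ['man', 'male', 'gentleman'])]
-- AGE = [('young', ['young']),
--        ('middle', ['middle-aged', 'middle aged']),
--        ('old', ['elderly', 'old'])]
-- BAG = [('backpack', ['backpack']),
--        ('handbag', ['handbag', 'purse']),
--        ('bag', ['bag'])]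
-- HAIR_COLORS = ['black', 'brown', 'blonde', 'gray', 'grey', 'white', 'red']
-- COLORS = ['black', 'white', 'red', 'blue', 'green', 'yellow', 'orange', 'purple',
--           'pink', 'brown', 'gray', 'grey', 'navy', 'beige']
-- UPPER_KEYWORDS = ['shirt', 'top', 'jacket', 'coat', 'sweater', 'blouse', 'dress', 't-shirt']
-- LOWER_KEYWORDS = ['pants', 'jeans', 'shorts', 'skirt', 'trousers']
--
--
-- def _pattern_table():
--     """One flat table of (attribute, priority, value, pattern) entries."""
--     table = []
--     for attr, rules in (('gender', GENDER), ('age', AGE), ('bag', BAG)):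
--         for pr, (val, pats) in enumerate(rules):
--             for p in pats:
--                 table.append((attr, pr, val, p))
--     for attr, cols, suffixes in (('hair_color', HAIR_COLORS, [' hair', '-haired']),
--                                  ('upper_color', COLORS, [' ' + k for k in UPPER_KEYWORDS]),
--                                  ('lower_color', COLORS, [' ' + k for k in LOWER_KEYWORDS])):
--         for pr, c in enumerate(cols):
--             for s in suffixes:
--                 table.append((attr, pr, c, c + s))
--     return table
--
--
-- def extract_attributes(caption):
--     """Extract attributes from caption text (single pass over a flat pattern
--     table, keeping per attribute the matching entry of minimal priority)."""
--     text = caption.lower()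
--     best = {}
--     for attr, pr, val, pat in _pattern_table():
--         if pat in text and (attr not in best or pr < best[attr][0]):
--             best[attr] = (pr, val)
--     return {k: (best[k][1] if k in best else None)
--             for k in ('gender', 'age', 'hair_color', 'upper_color', 'lower_color', 'bag')}
-- ===== Notes on version B (the rewrite author's own statement) =====
-- stated objective: alternative
-- what changed: A's six independent if/elif chains and nested break-loops are replaced by one flat table of (attribute, priority, value, pattern) entries scanned in a single pass that keeps, per attribute, the matching entry of minimal priority; A's first-match precedence becomes priority minimisation and all early exits disappear.
import Mathlib
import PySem

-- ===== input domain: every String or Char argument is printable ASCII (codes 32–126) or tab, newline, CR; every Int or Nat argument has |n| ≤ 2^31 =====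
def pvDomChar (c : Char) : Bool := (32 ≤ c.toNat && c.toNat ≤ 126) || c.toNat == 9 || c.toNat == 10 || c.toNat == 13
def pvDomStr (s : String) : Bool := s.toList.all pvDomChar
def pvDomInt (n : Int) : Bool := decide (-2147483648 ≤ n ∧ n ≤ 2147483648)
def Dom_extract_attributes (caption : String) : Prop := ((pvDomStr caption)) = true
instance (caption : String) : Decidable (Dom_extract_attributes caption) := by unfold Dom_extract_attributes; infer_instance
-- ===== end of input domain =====

set_option maxRecDepth 16384
set_option maxHeartbeats 1000000


-- B replaces A's six independent if/elif chains and break-loops by a single pass over one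
-- flat (attribute, priority, value, pattern) table keeping per attribute the matching entry
-- of minimal priority (objective: alternative; same cost).

-- ===== PORT A =====
-- for color in hair_colors: if f'{color} hair' in caption_lower or f'{color}-haired' in caption_lower: set; break
def pvHairLoopA (t : String) (colors : List String) (d : PySem.Dict String (Option String)) :
    PySem.Dict String (Option String) :=
  match colors with
  | [] => d
  | color :: rest =>
      if PySem.Str.isIn (color ++ " hair") t || PySem.Str.isIn (color ++ "-haired") t then
        d.insert "hair_color" (some color)
      else
        pvHairLoopA t rest d

-- inner 'for keyword in …: if f'{color} {keyword}' in caption_lower: set; break'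
def pvKwLoopA (t key color : String) (kws : List String) (d : PySem.Dict String (Option String)) :
    PySem.Dict String (Option String) :=
  match kws with
  | [] => d
  | kw :: rest =>
      if PySem.Str.isIn (color ++ " " ++ kw) t then d.insert key (some color)
      else pvKwLoopA t key color rest d

-- outer 'for color in colors: …; if attributes[key]: break'  (a color string is truthy iff set)
def pvColorLoopA (t key : String) (kws colors : List String) (d : PySem.Dict String (Option String)) :
    PySem.Dict String (Option String) :=
  match colors with
  | [] => d
  | color :: rest =>
      let d' := pvKwLoopA t key color kws d
      if (d'.getD key none).isSome then d' else pvColorLoopA t key kws rest d'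

def extract_attributes (caption : String) : List (String × Option String) :=
  let cl := PySem.Str.lower caption
  let d0 : PySem.Dict String (Option String) :=
    PySem.Dict.ofList [("gender", none), ("age", none), ("hair_color", none),
                       ("upper_color", none), ("lower_color", none), ("bag", none)]
  let d1 := if PySem.Str.isIn "woman" cl || PySem.Str.isIn "female" cl || PySem.Str.isIn "lady" cl then
              d0.insert "gender" (some "female")
            else if PySem.Str.isIn "man" cl || PySem.Str.isIn "male" cl || PySem.Str.isIn "gentleman" cl then
              d0.insert "gender" (some "male")
            else d0
  let d2 := if PySem.Str.isIn "young" cl then d1.insert "age" (some "young")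
            else if PySem.Str.isIn "middle-aged" cl || PySem.Str.isIn "middle aged" cl then
              d1.insert "age" (some "middle")
            else if PySem.Str.isIn "elderly" cl || PySem.Str.isIn "old" cl then
              d1.insert "age" (some "old")
            else d1
  let d3 := pvHairLoopA cl ["black", "brown", "blonde", "gray", "grey", "white", "red"] d2
  let d4 := pvColorLoopA cl "upper_color"
              ["shirt", "top", "jacket", "coat", "sweater", "blouse", "dress", "t-shirt"]
              ["black", "white", "red", "blue", "green", "yellow", "orange", "purple",
               "pink", "brown", "gray", "grey", "navy", "beige"] d3
  let d5 := pvColorLoopA cl "lower_color"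
              ["pants", "jeans", "shorts", "skirt", "trousers"]
              ["black", "white", "red", "blue", "green", "yellow", "orange", "purple",
               "pink", "brown", "gray", "grey", "navy", "beige"] d4
  let d6 := if PySem.Str.isIn "backpack" cl then d5.insert "bag" (some "backpack")
            else if PySem.Str.isIn "handbag" cl || PySem.Str.isIn "purse" cl then
              d5.insert "bag" (some "handbag")
            else if PySem.Str.isIn "bag" cl then d5.insert "bag" (some "bag")
            else d5
  d6.items

-- ===== PORT B =====
-- Source B's module-level rule tables
def pvRuleTables : List (String × List (String × List String)) :=
  [("gender", [("female", ["woman", "female", "lady"]), ("male", ["man", "male", "gentleman"])]),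
   ("age", [("young", ["young"]), ("middle", ["middle-aged", "middle aged"]), ("old", ["elderly", "old"])]),
   ("bag", [("backpack", ["backpack"]), ("handbag", ["handbag", "purse"]), ("bag", ["bag"])])]

def pvColorTables : List (String × List String × List String) :=
  [("hair_color", ["black", "brown", "blonde", "gray", "grey", "white", "red"], [" hair", "-haired"]),
   ("upper_color",
    ["black", "white", "red", "blue", "green", "yellow", "orange", "purple",
     "pink", "brown", "gray", "grey", "navy", "beige"],
    (["shirt", "top", "jacket", "coat", "sweater", "blouse", "dress", "t-shirt"].map (fun k => " " ++ k))),
   ("lower_color",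
    ["black", "white", "red", "blue", "green", "yellow", "orange", "purple",
     "pink", "brown", "gray", "grey", "navy", "beige"],
    (["pants", "jeans", "shorts", "skirt", "trousers"].map (fun k => " " ++ k)))]

-- _pattern_table(): one flat table of (attribute, priority, value, pattern) entries
def pvPatternTable : List (String × Int × String × String) :=
  (pvRuleTables.flatMap (fun rt =>
     (PySem.List.enumerate rt.2).flatMap (fun pe =>
        pe.2.2.map (fun p => (rt.1, pe.1, pe.2.1, p)))))
  ++ (pvColorTables.flatMap (fun ct =>
     (PySem.List.enumerate ct.2.1).flatMap (fun pc =>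
        ct.2.2.map (fun s => (ct.1, pc.1, pc.2, pc.2 ++ s)))))

-- loop body: if pat in text and (attr not in best or pr < best[attr][0]): best[attr] = (pr, val)
def pvBestStep (t : String) (best : PySem.Dict String (Int × String))
    (e : String × Int × String × String) : PySem.Dict String (Int × String) :=
  if PySem.Str.isIn e.2.2.2 t &&
       (match best.get? e.1 with
        | none => true
        | some pv => decide (e.2.1 < pv.1)) then
    best.insert e.1 (e.2.1, e.2.2.1)
  else best

def extract_attributes_alt (caption : String) : List (String × Option String) :=
  let text := PySem.Str.lower caption
  let best := pvPatternTable.foldl (pvBestStep text) PySem.Dict.empty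
  ["gender", "age", "hair_color", "upper_color", "lower_color", "bag"].map
    (fun k => (k, (best.get? k).map (fun pv => pv.2)))

-- ===== PRECONDITION & SPEC =====
def Spec_extract_attributes (caption : String) (out : List (String × Option String)) : Prop := out = extract_attributes_alt caption
instance (caption : String) (out : List (String × Option String)) : Decidable (Spec_extract_attributes caption out) := by unfold Spec_extract_attributes; infer_instance

-- ===== CLAIM (what is proved, stated in full; the proofs are below) =====
def Claim_equal_extract_attributes : Prop := ∀ (caption : String), Dom_extract_attributes caption → Spec_extract_attributes caption (extract_attributes caption)

-- ===== LEMMAS AND PROOFS =====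

-- first matching entry (pr, val, pat) of a block, as (pr, val)
def pvFirst (t : String) : List (Int × String × String) → Option (Int × String)
  | [] => none
  | e :: rest => if PySem.Str.isIn e.2.2 t then some (e.1, e.2.1) else pvFirst t rest

-- the (pr, val, pat) entries a color list with pattern suffixes generates, priorities from i
def pvMkColorBlock (i : Int) : List String → List String → List (Int × String × String)
  | [], _ => []
  | c :: cs, sufs => sufs.map (fun s => (i, c, c ++ s)) ++ pvMkColorBlock (i + 1) cs sufs

def pvGBl : List (Int × String × String) :=
  [(0, "female", "woman"), (0, "female", "female"), (0, "female", "lady"),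
   (1, "male", "man"), (1, "male", "male"), (1, "male", "gentleman")]
def pvABl : List (Int × String × String) :=
  [(0, "young", "young"), (1, "middle", "middle-aged"), (1, "middle", "middle aged"),
   (2, "old", "elderly"), (2, "old", "old")]
def pvBagBl : List (Int × String × String) :=
  [(0, "backpack", "backpack"), (1, "handbag", "handbag"), (1, "handbag", "purse"), (2, "bag", "bag")]
def pvHBl : List (Int × String × String) :=
  pvMkColorBlock 0 ["black", "brown", "blonde", "gray", "grey", "white", "red"] [" hair", "-haired"]
def pvUBl : List (Int × String × String) :=
  pvMkColorBlock 0
    ["black", "white", "red", "blue", "green", "yellow", "orange", "purple",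
     "pink", "brown", "gray", "grey", "navy", "beige"]
    (["shirt", "top", "jacket", "coat", "sweater", "blouse", "dress", "t-shirt"].map (fun k => " " ++ k))
def pvLBl : List (Int × String × String) :=
  pvMkColorBlock 0
    ["black", "white", "red", "blue", "green", "yellow", "orange", "purple",
     "pink", "brown", "gray", "grey", "navy", "beige"]
    (["pants", "jeans", "shorts", "skirt", "trousers"].map (fun k => " " ++ k))

-- a step at another attribute does not change key k
theorem step_ne (t : String) (best : PySem.Dict String (Int × String))
    (e : String × Int × String × String) (k : String) (h : e.1 ≠ k) :
    (pvBestStep t best e).get? k = best.get? k := by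
  unfold pvBestStep
  split_ifs with hc
  · exact PySem.Dict.get?_insert_of_ne _ _ h.symm
  · rfl

-- a run of entries of other attributes leaves key k untouched
theorem fold_skip (t : String) (k : String) :
    ∀ (es : List (String × Int × String × String)) (best : PySem.Dict String (Int × String)),
    (∀ e ∈ es, e.1 ≠ k) →
    (es.foldl (pvBestStep t) best).get? k = best.get? k := by
  intro es
  induction es with
  | nil => intro best _; rfl
  | cons e rest ih =>
      intro best h
      rw [List.foldl_cons, ih _ (fun q hq => h q (List.mem_cons_of_mem _ hq)),
          step_ne t best e k (h e (List.mem_cons_self))]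

-- once key k holds a priority no later entry beats, it stays
theorem fold_hold (t : String) (k : String) (p : Int) (v : String) :
    ∀ (es : List (String × Int × String × String)) (best : PySem.Dict String (Int × String)),
    best.get? k = some (p, v) → (∀ e ∈ es, e.1 = k → ¬ e.2.1 < p) →
    (es.foldl (pvBestStep t) best).get? k = some (p, v) := by
  intro es
  induction es with
  | nil => intro best h _; exact h
  | cons e rest ih =>
      intro best h hlo
      rw [List.foldl_cons]
      by_cases hk : e.1 = k
      · have hlt : ¬ e.2.1 < p := hlo e List.mem_cons_self hk
        have hstep : pvBestStep t best e = best := by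
          unfold pvBestStep
          rw [hk, h]
          simp [hlt]
        rw [hstep]
        exact ih best h (fun q hq => hlo q (List.mem_cons_of_mem _ hq))
      · exact ih _ (by rw [step_ne t best e k hk]; exact h)
            (fun q hq => hlo q (List.mem_cons_of_mem _ hq))

-- folding one whole block with nondecreasing priorities computes the first match
theorem fold_block (t : String) (k : String) :
    ∀ (bl : List (Int × String × String)) (best : PySem.Dict String (Int × String)),
    best.get? k = none → bl.Pairwise (fun a b => a.1 ≤ b.1) →
    ((bl.map (fun e => (k, e))).foldl (pvBestStep t) best).get? k = pvFirst t bl := by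
  intro bl
  induction bl with
  | nil => intro best h _; exact h
  | cons e rest ih =>
      intro best h hp
      rw [List.pairwise_cons] at hp
      rw [List.map_cons, List.foldl_cons]
      by_cases hm : PySem.Str.isIn e.2.2 t = true
      · have hstep : pvBestStep t best (k, e) = best.insert k (e.1, e.2.1) := by
          unfold pvBestStep
          simp only [h, hm]
          rfl
        rw [hstep]
        have : ((rest.map (fun e => (k, e))).foldl (pvBestStep t)
                 (best.insert k (e.1, e.2.1))).get? k = some (e.1, e.2.1) := by
          apply fold_hold
          · exact PySem.Dict.get?_insert_self _ _ _
          · intro q hq _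
            rw [List.mem_map] at hq
            obtain ⟨e', he', rfl⟩ := hq
            exact not_lt.mpr (hp.1 e' he')
        rw [this, pvFirst, if_pos hm]
      · rw [Bool.not_eq_true] at hm
        simp at hm
        have hstep : pvBestStep t best (k, e) = best := by
          unfold pvBestStep
          simp [hm]
        rw [hstep, pvFirst, if_neg (by simp [hm])]
        exact ih best h hp.2

theorem pvFirst_append (t : String) :
    ∀ (l1 l2 : List (Int × String × String)),
    pvFirst t (l1 ++ l2) = (pvFirst t l1).or (pvFirst t l2) := by
  intro l1 l2
  induction l1 with
  | nil => rfl
  | cons e rest ih =>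
      rw [List.cons_append, pvFirst, pvFirst]
      by_cases hm : PySem.Str.isIn e.2.2 t = true
      · rw [if_pos hm, if_pos hm]; rfl
      · rw [if_neg hm, if_neg hm, ih]

-- ----- A-side characterizations -----

theorem insert_none_eq {d : PySem.Dict String (Option String)} {k : String}
    (h : d.get? k = some none) (hnd : d.keys.Nodup) : d.insert k none = d := by
  apply PySem.Dict.ext
  have hc : d.contains k = true := by rw [PySem.Dict.contains_eq_isSome_get?, h]; rfl
  rw [PySem.Dict.items_insert_of_contains _ _ hc]
  have hid : ∀ p ∈ d.items, (if p.1 == k then (k, (none : Option String)) else p) = id p := by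
    intro p hp
    by_cases hk : p.1 = k
    · obtain ⟨a, b⟩ := p
      simp only at hk; subst hk
      have := PySem.Dict.get?_of_mem_items d hp hnd
      rw [h] at this
      simp_all
    · simp [hk]
  rw [List.map_congr_left hid, List.map_id]

theorem gender_eq (t : String) (d : PySem.Dict String (Option String))
    (h : d.get? "gender" = some none) (hnd : d.keys.Nodup) :
    (if PySem.Str.isIn "woman" t || PySem.Str.isIn "female" t || PySem.Str.isIn "lady" t then
       d.insert "gender" (some "female")
     else if PySem.Str.isIn "man" t || PySem.Str.isIn "male" t || PySem.Str.isIn "gentleman" t then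
       d.insert "gender" (some "male")
     else d)
    = d.insert "gender" ((pvFirst t pvGBl).map (fun pv => pv.2)) := by
  simp only [pvGBl, pvFirst]
  by_cases h1 : PySem.Str.isIn "woman" t = true <;>
  by_cases h2 : PySem.Str.isIn "female" t = true <;>
  by_cases h3 : PySem.Str.isIn "lady" t = true <;>
  by_cases h4 : PySem.Str.isIn "man" t = true <;>
  by_cases h5 : PySem.Str.isIn "male" t = true <;>
  by_cases h6 : PySem.Str.isIn "gentleman" t = true <;>
  simp_all [insert_none_eq h hnd]

theorem age_eq (t : String) (d : PySem.Dict String (Option String))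
    (h : d.get? "age" = some none) (hnd : d.keys.Nodup) :
    (if PySem.Str.isIn "young" t then d.insert "age" (some "young")
     else if PySem.Str.isIn "middle-aged" t || PySem.Str.isIn "middle aged" t then
       d.insert "age" (some "middle")
     else if PySem.Str.isIn "elderly" t || PySem.Str.isIn "old" t then
       d.insert "age" (some "old")
     else d)
    = d.insert "age" ((pvFirst t pvABl).map (fun pv => pv.2)) := by
  simp only [pvABl, pvFirst]
  by_cases h1 : PySem.Str.isIn "young" t = true <;>
  by_cases h2 : PySem.Str.isIn "middle-aged" t = true <;>
  by_cases h3 : PySem.Str.isIn "middle aged" t = true <;>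
  by_cases h4 : PySem.Str.isIn "elderly" t = true <;>
  by_cases h5 : PySem.Str.isIn "old" t = true <;>
  simp_all [insert_none_eq h hnd]

theorem bag_eq (t : String) (d : PySem.Dict String (Option String))
    (h : d.get? "bag" = some none) (hnd : d.keys.Nodup) :
    (if PySem.Str.isIn "backpack" t then d.insert "bag" (some "backpack")
     else if PySem.Str.isIn "handbag" t || PySem.Str.isIn "purse" t then
       d.insert "bag" (some "handbag")
     else if PySem.Str.isIn "bag" t then d.insert "bag" (some "bag")
     else d)
    = d.insert "bag" ((pvFirst t pvBagBl).map (fun pv => pv.2)) := by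
  simp only [pvBagBl, pvFirst]
  by_cases h1 : PySem.Str.isIn "backpack" t = true <;>
  by_cases h2 : PySem.Str.isIn "handbag" t = true <;>
  by_cases h3 : PySem.Str.isIn "purse" t = true <;>
  by_cases h4 : PySem.Str.isIn "bag" t = true <;>
  simp_all [insert_none_eq h hnd]

theorem hair_loop_eq (t : String) :
    ∀ (colors : List String) (i : Int) (d : PySem.Dict String (Option String)),
    d.get? "hair_color" = some none → d.keys.Nodup →
    pvHairLoopA t colors d =
      d.insert "hair_color"
        ((pvFirst t (pvMkColorBlock i colors [" hair", "-haired"])).map (fun pv => pv.2)) := by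
  intro colors
  induction colors with
  | nil =>
      intro i d h hnd
      simp only [pvHairLoopA, pvMkColorBlock, pvFirst, Option.map_none]
      exact (insert_none_eq h hnd).symm
  | cons c rest ih =>
      intro i d h hnd
      simp only [pvHairLoopA, pvMkColorBlock, List.map_cons, List.map_nil, List.cons_append,
                 List.nil_append, pvFirst]
      by_cases h1 : PySem.Str.isIn (c ++ " hair") t = true
      · simp only [h1, Bool.true_or, if_true, Option.map_some]
      · rw [Bool.not_eq_true] at h1
        by_cases h2 : PySem.Str.isIn (c ++ "-haired") t = true
        · simp only [h1, h2, Bool.false_or, if_true, Bool.false_eq_true, if_false, Option.map_some]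
        · rw [Bool.not_eq_true] at h2
          simp only [h1, h2, Bool.or_self, Bool.false_eq_true, if_false]
          exact ih (i + 1) d h hnd

-- A's inner keyword loop is a single any-test
theorem kw_loop_eq (t key color : String) : ∀ (kws : List String) (d : PySem.Dict String (Option String)),
    pvKwLoopA t key color kws d =
      if kws.any (fun k => PySem.Str.isIn (color ++ " " ++ k) t) then d.insert key (some color) else d := by
  intro kws
  induction kws with
  | nil => intro d; simp [pvKwLoopA]
  | cons kw rest ih =>
      intro d
      simp only [pvKwLoopA, List.any_cons]
      rw [ih]
      by_cases hc : PySem.Str.isIn (color ++ " " ++ kw) t = true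
      · simp only [hc, Bool.true_or, if_true]
      · rw [Bool.not_eq_true] at hc
        simp only [hc, Bool.false_or, Bool.false_eq_true, if_false]

theorem pvFirst_kwmap (t : String) (i : Int) (c : String) :
    ∀ (kws : List String),
    pvFirst t ((kws.map (fun k => " " ++ k)).map (fun s => (i, c, c ++ s))) =
      if kws.any (fun k => PySem.Str.isIn (c ++ " " ++ k) t) then some (i, c) else none := by
  intro kws
  induction kws with
  | nil => rfl
  | cons kw rest ih =>
      simp only [List.map_cons, List.any_cons, pvFirst]
      rw [ih, ← String.append_assoc]
      by_cases hc : PySem.Str.isIn (c ++ " " ++ kw) t = true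
      · simp only [hc, Bool.true_or, if_true]
      · rw [Bool.not_eq_true] at hc
        simp only [hc, Bool.false_or, Bool.false_eq_true, if_false]

theorem color_loop_eq (t key : String) (kws : List String) :
    ∀ (colors : List String) (i : Int) (d : PySem.Dict String (Option String)),
    d.get? key = some none → d.keys.Nodup →
    pvColorLoopA t key kws colors d =
      d.insert key
        ((pvFirst t (pvMkColorBlock i colors (kws.map (fun k => " " ++ k)))).map (fun pv => pv.2)) := by
  intro colors
  induction colors with
  | nil =>
      intro i d h hnd
      simp only [pvColorLoopA, pvMkColorBlock, pvFirst, Option.map_none]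
      exact (insert_none_eq h hnd).symm
  | cons c rest ih =>
      intro i d h hnd
      have hD : d.getD key none = none := PySem.Dict.getD_of_get?_eq_some d none h
      simp only [pvColorLoopA, pvMkColorBlock, kw_loop_eq, pvFirst_append, pvFirst_kwmap]
      by_cases hc : (kws.any fun k => PySem.Str.isIn (c ++ " " ++ k) t) = true
      · simp only [hc, if_true, PySem.Dict.getD_insert_self, Option.isSome_some, Option.or,
                   Option.map_some]
      · rw [Bool.not_eq_true] at hc
        simp only [hc, Bool.false_eq_true, if_false, hD, Option.isSome_none, Option.or]
        exact ih (i + 1) d h hnd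

-- items of the six overwriting inserts on the initial dict, in insertion order
theorem items_final (g a h u l b : Option String) :
    (((((((PySem.Dict.ofList [("gender", (none : Option String)), ("age", none), ("hair_color", none),
          ("upper_color", none), ("lower_color", none), ("bag", none)]).insert "gender" g).insert "age" a).insert
          "hair_color" h).insert "upper_color" u).insert "lower_color" l).insert "bag" b).items
    = [("gender", g), ("age", a), ("hair_color", h), ("upper_color", u), ("lower_color", l), ("bag", b)] := by
  rfl

-- ----- B-side evaluation: the fold of the table, read off per key -----

theorem fold_table (t k : String) (pre post : List (String × Int × String × String))
    (mid : List (Int × String × String))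
    (hpre : ∀ e ∈ pre, e.1 ≠ k) (hpost : ∀ e ∈ post, e.1 ≠ k)
    (hp : mid.Pairwise (fun a b => a.1 ≤ b.1)) :
    ((pre ++ mid.map (fun e => (k, e)) ++ post).foldl (pvBestStep t) PySem.Dict.empty).get? k
      = pvFirst t mid := by
  rw [List.foldl_append, List.foldl_append, fold_skip t k post _ hpost,
      fold_block t k mid _ (by rw [fold_skip t k pre _ hpre]; rfl) hp]

theorem final_gender (t : String) :
    (pvPatternTable.foldl (pvBestStep t) PySem.Dict.empty).get? "gender" = pvFirst t pvGBl := by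
  rw [show pvPatternTable = [] ++ pvGBl.map (fun e => ("gender", e)) ++
        (pvABl.map (fun e => ("age", e)) ++ pvBagBl.map (fun e => ("bag", e)) ++
         pvHBl.map (fun e => ("hair_color", e)) ++ pvUBl.map (fun e => ("upper_color", e)) ++
         pvLBl.map (fun e => ("lower_color", e))) from rfl]
  exact fold_table t "gender" _ _ _ (by simp) (by decide) (by decide)

theorem final_age (t : String) :
    (pvPatternTable.foldl (pvBestStep t) PySem.Dict.empty).get? "age" = pvFirst t pvABl := by
  rw [show pvPatternTable = pvGBl.map (fun e => ("gender", e)) ++ pvABl.map (fun e => ("age", e)) ++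
        (pvBagBl.map (fun e => ("bag", e)) ++ pvHBl.map (fun e => ("hair_color", e)) ++
         pvUBl.map (fun e => ("upper_color", e)) ++ pvLBl.map (fun e => ("lower_color", e))) from rfl]
  exact fold_table t "age" _ _ _ (by decide) (by decide) (by decide)

theorem final_bag (t : String) :
    (pvPatternTable.foldl (pvBestStep t) PySem.Dict.empty).get? "bag" = pvFirst t pvBagBl := by
  rw [show pvPatternTable = (pvGBl.map (fun e => ("gender", e)) ++ pvABl.map (fun e => ("age", e))) ++
        pvBagBl.map (fun e => ("bag", e)) ++
        (pvHBl.map (fun e => ("hair_color", e)) ++ pvUBl.map (fun e => ("upper_color", e)) ++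
         pvLBl.map (fun e => ("lower_color", e))) from rfl]
  exact fold_table t "bag" _ _ _ (by decide) (by decide) (by decide)

theorem final_hair (t : String) :
    (pvPatternTable.foldl (pvBestStep t) PySem.Dict.empty).get? "hair_color" = pvFirst t pvHBl := by
  rw [show pvPatternTable = (pvGBl.map (fun e => ("gender", e)) ++ pvABl.map (fun e => ("age", e)) ++
        pvBagBl.map (fun e => ("bag", e))) ++ pvHBl.map (fun e => ("hair_color", e)) ++
        (pvUBl.map (fun e => ("upper_color", e)) ++ pvLBl.map (fun e => ("lower_color", e))) from rfl]
  exact fold_table t "hair_color" _ _ _ (by decide) (by decide) (by decide)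

theorem final_upper (t : String) :
    (pvPatternTable.foldl (pvBestStep t) PySem.Dict.empty).get? "upper_color" = pvFirst t pvUBl := by
  rw [show pvPatternTable = (pvGBl.map (fun e => ("gender", e)) ++ pvABl.map (fun e => ("age", e)) ++
        pvBagBl.map (fun e => ("bag", e)) ++ pvHBl.map (fun e => ("hair_color", e))) ++
        pvUBl.map (fun e => ("upper_color", e)) ++ pvLBl.map (fun e => ("lower_color", e)) from rfl]
  exact fold_table t "upper_color" _ _ _ (by decide) (by decide) (by decide)

theorem final_lower (t : String) :
    (pvPatternTable.foldl (pvBestStep t) PySem.Dict.empty).get? "lower_color" = pvFirst t pvLBl := by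
  rw [show pvPatternTable = (pvGBl.map (fun e => ("gender", e)) ++ pvABl.map (fun e => ("age", e)) ++
        pvBagBl.map (fun e => ("bag", e)) ++ pvHBl.map (fun e => ("hair_color", e)) ++
        pvUBl.map (fun e => ("upper_color", e))) ++ pvLBl.map (fun e => ("lower_color", e)) ++
        [] from rfl]
  exact fold_table t "lower_color" _ _ _ (by decide) (by simp) (by decide)

theorem alt_eq (caption : String) :
    extract_attributes_alt caption =
      [("gender", (pvFirst (PySem.Str.lower caption) pvGBl).map (fun pv => pv.2)),
       ("age", (pvFirst (PySem.Str.lower caption) pvABl).map (fun pv => pv.2)),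
       ("hair_color", (pvFirst (PySem.Str.lower caption) pvHBl).map (fun pv => pv.2)),
       ("upper_color", (pvFirst (PySem.Str.lower caption) pvUBl).map (fun pv => pv.2)),
       ("lower_color", (pvFirst (PySem.Str.lower caption) pvLBl).map (fun pv => pv.2)),
       ("bag", (pvFirst (PySem.Str.lower caption) pvBagBl).map (fun pv => pv.2))] := by
  simp only [extract_attributes_alt, List.map_cons, List.map_nil]
  rw [final_gender, final_age, final_hair, final_upper, final_lower, final_bag]

-- ===== VERDICT (by name: the statement is the Claim_ definition above) =====
theorem extract_attributes_spec : Claim_equal_extract_attributes := by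
  intro caption _
  unfold Spec_extract_attributes
  rw [alt_eq]
  simp only [extract_attributes]
  rw [gender_eq _ _ (by decide) (by decide)]
  rw [age_eq _ _
        (by rw [PySem.Dict.get?_insert_of_ne _ _ (by decide)]; all_goals decide)
        (by rw [PySem.Dict.keys_insert_of_contains _ _ (by decide)]; all_goals decide)]
  rw [hair_loop_eq _ _ 0 _
        (by rw [PySem.Dict.get?_insert_of_ne _ _ (by decide),
                PySem.Dict.get?_insert_of_ne _ _ (by decide)]; all_goals decide)
        (by rw [PySem.Dict.keys_insert_of_contains _ _
                  (by simp only [PySem.Dict.contains_insert]; decide),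
                PySem.Dict.keys_insert_of_contains _ _ (by decide)]; all_goals decide)]
  rw [color_loop_eq _ "upper_color" _ _ 0 _
        (by rw [PySem.Dict.get?_insert_of_ne _ _ (by decide),
                PySem.Dict.get?_insert_of_ne _ _ (by decide),
                PySem.Dict.get?_insert_of_ne _ _ (by decide)]; all_goals decide)
        (by rw [PySem.Dict.keys_insert_of_contains _ _
                  (by simp only [PySem.Dict.contains_insert]; decide),
                PySem.Dict.keys_insert_of_contains _ _
                  (by simp only [PySem.Dict.contains_insert]; decide),
                PySem.Dict.keys_insert_of_contains _ _ (by decide)]; all_goals decide)]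
  rw [color_loop_eq _ "lower_color" _ _ 0 _
        (by rw [PySem.Dict.get?_insert_of_ne _ _ (by decide),
                PySem.Dict.get?_insert_of_ne _ _ (by decide),
                PySem.Dict.get?_insert_of_ne _ _ (by decide),
                PySem.Dict.get?_insert_of_ne _ _ (by decide)]; all_goals decide)
        (by rw [PySem.Dict.keys_insert_of_contains _ _
                  (by simp only [PySem.Dict.contains_insert]; decide),
                PySem.Dict.keys_insert_of_contains _ _
                  (by simp only [PySem.Dict.contains_insert]; decide),
                PySem.Dict.keys_insert_of_contains _ _
                  (by simp only [PySem.Dict.contains_insert]; decide),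
                PySem.Dict.keys_insert_of_contains _ _ (by decide)]; all_goals decide)]
  rw [bag_eq _ _
        (by rw [PySem.Dict.get?_insert_of_ne _ _ (by decide),
                PySem.Dict.get?_insert_of_ne _ _ (by decide),
                PySem.Dict.get?_insert_of_ne _ _ (by decide),
                PySem.Dict.get?_insert_of_ne _ _ (by decide),
                PySem.Dict.get?_insert_of_ne _ _ (by decide)]; all_goals decide)
        (by rw [PySem.Dict.keys_insert_of_contains _ _
                  (by simp only [PySem.Dict.contains_insert]; decide),
                PySem.Dict.keys_insert_of_contains _ _
                  (by simp only [PySem.Dict.contains_insert]; decide),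
                PySem.Dict.keys_insert_of_contains _ _
                  (by simp only [PySem.Dict.contains_insert]; decide),
                PySem.Dict.keys_insert_of_contains _ _
                  (by simp only [PySem.Dict.contains_insert]; decide),
                PySem.Dict.keys_insert_of_contains _ _ (by decide)]; all_goals decide)]
  rw [items_final]
  simp only [pvHBl, pvUBl, pvLBl]
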